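-- pv_equiv track=rewrite | github.com/AviatorWei/FMWC-script | bid_sign.py | CombineSquads
-- ===== SOURCE A (Python) =====
-- def pos_value(p): #输入位置的单个字符，输出数值0，1，2，3.
--     positions = ['G', 'D', 'M', 'F']
--     pos_dict = dict([(v, i) for i, v in enumerate(positions)])
--     return pos_dict[p]
--
-- def CombineSquads(squads1, squads2): #输入两个各队阵容的字典squads1和squads2，输出合并了每队阵容的字典。
--     output = dict()
--     for key in squads1.keys():
--         squad1 = squads1[key]
--         squad2 = squads2[key]
--         squad = squad1 + squad2
--         output[key] = sorted(squad, key = lambda entry : pos_value(entry[2]))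
--     return output
-- ===== SOURCE B (Python) =====
-- def CombineSquads(squads1, squads2):
--     output = dict()
--     for key, squad1 in squads1.items():
--         buckets = {'G': [], 'D': [], 'M': [], 'F': []}
--         for entry in squad1 + squads2[key]:
--             buckets[entry[2]].append(entry)
--         output[key] = buckets['G'] + buckets['D'] + buckets['M'] + buckets['F']
--     return output
-- ===== Notes on version B (the rewrite author's own statement) =====
-- stated objective: alternative
-- what changed: Replaces the per-squad comparison sort keyed by a position-lookup helper with a single-pass stable bucket sort into four fixed position buckets G/D/M/F that are then concatenated.
import Mathlib
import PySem

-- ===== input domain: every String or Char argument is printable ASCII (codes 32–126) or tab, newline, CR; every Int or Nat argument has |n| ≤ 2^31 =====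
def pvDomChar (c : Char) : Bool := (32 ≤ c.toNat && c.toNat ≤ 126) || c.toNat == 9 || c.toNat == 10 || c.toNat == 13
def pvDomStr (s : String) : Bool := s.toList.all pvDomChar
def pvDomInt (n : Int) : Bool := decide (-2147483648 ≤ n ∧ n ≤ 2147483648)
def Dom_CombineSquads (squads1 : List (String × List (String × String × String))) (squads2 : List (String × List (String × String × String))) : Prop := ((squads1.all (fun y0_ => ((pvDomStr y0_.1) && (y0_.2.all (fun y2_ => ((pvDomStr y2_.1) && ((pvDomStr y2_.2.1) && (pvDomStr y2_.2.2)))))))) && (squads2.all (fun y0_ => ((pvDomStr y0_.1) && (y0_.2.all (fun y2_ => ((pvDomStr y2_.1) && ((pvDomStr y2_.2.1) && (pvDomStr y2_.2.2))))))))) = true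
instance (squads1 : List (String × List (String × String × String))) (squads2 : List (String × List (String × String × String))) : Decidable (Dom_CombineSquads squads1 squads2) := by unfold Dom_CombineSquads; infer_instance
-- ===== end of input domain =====

-- B replaces A's comparison sort (keyed by a position-rank lookup) with a stable four-bucket
-- sort into fixed G/D/M/F buckets; same return value on Pre_ (alternative decomposition).


-- ===== PORT A =====
-- pos_value: pos_dict[p]; total form getD 0 — the KeyError inputs (position not in
-- 'G','D','M','F') are excluded by Pre_CombineSquads.
def posValue (p : String) : Int :=
  let positions : List String := ["G", "D", "M", "F"]
  let posDict : PySem.Dict String Int :=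
    PySem.Dict.ofList ((PySem.List.enumerate positions).map (fun iv => (iv.2, iv.1)))
  posDict.getD p 0

def CombineSquads (squads1 : List (String × List (String × String × String))) (squads2 : List (String × List (String × String × String))) : List (String × List (String × String × String)) :=
  let d1 := PySem.Dict.ofList squads1
  let d2 := PySem.Dict.ofList squads2
  -- squads2[key]: total form getD [] — the KeyError inputs (key missing from squads2)
  -- are excluded by Pre_CombineSquads.
  let output := d1.keys.foldl (fun out key =>
    let squad1 := d1.getD key []
    let squad2 := d2.getD key []
    let squad := squad1 ++ squad2
    out.insert key (PySem.List.sorted squad (fun entry => posValue entry.2.2) false))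
    PySem.Dict.empty
  output.items

-- ===== PORT B =====
def CombineSquads_alt (squads1 : List (String × List (String × String × String))) (squads2 : List (String × List (String × String × String))) : List (String × List (String × String × String)) :=
  let d2 := PySem.Dict.ofList squads2
  let output := (PySem.Dict.ofList squads1).items.foldl (fun out p =>
    -- buckets[entry[2]].append(entry): total form modify with default [] — an unknown
    -- position string (Python KeyError) is excluded by Pre_CombineSquads.
    let buckets := (p.2 ++ d2.getD p.1 []).foldl
      (fun b e => b.modify e.2.2 [] (fun v => v ++ [e]))
      (PySem.Dict.ofList [("G", []), ("D", []), ("M", []), ("F", [])])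
    out.insert p.1 (buckets.getD "G" [] ++ buckets.getD "D" [] ++ buckets.getD "M" [] ++ buckets.getD "F" []))
    PySem.Dict.empty
  output.items

-- ===== PRECONDITION & SPEC =====
-- Pre_ excludes exactly the inputs where Python A raises: a key of squads1 missing from
-- squads2 (KeyError on squads2[key]) or a squad entry whose position string is not one of
-- "G","D","M","F" (KeyError in pos_value).
def Pre_CombineSquads (squads1 : List (String × List (String × String × String))) (squads2 : List (String × List (String × String × String))) : Prop :=
  ∀ p ∈ (PySem.Dict.ofList squads1).items,
    (PySem.Dict.ofList squads2).contains p.1 = true ∧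
    ∀ e ∈ p.2 ++ (PySem.Dict.ofList squads2).getD p.1 [],
      e.2.2 ∈ (["G", "D", "M", "F"] : List String)
instance (squads1 : List (String × List (String × String × String))) (squads2 : List (String × List (String × String × String))) : Decidable (Pre_CombineSquads squads1 squads2) := by unfold Pre_CombineSquads; infer_instance

def pvWitness_CombineSquads : (List (String × List (String × String × String))) × (List (String × List (String × String × String))) :=
  ([("t1", [("a", "x", "F"), ("b", "y", "G")])], [("t1", [("c", "z", "D")])])

def Spec_CombineSquads (squads1 : List (String × List (String × String × String))) (squads2 : List (String × List (String × String × String))) (out : List (String × List (String × String × String))) : Prop := out = CombineSquads_alt squads1 squads2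
instance (squads1 : List (String × List (String × String × String))) (squads2 : List (String × List (String × String × String))) (out : List (String × List (String × String × String))) : Decidable (Spec_CombineSquads squads1 squads2 out) := by unfold Spec_CombineSquads; infer_instance

-- ===== CLAIM (what is proved, stated in full; the proofs are below) =====
def Claim_equal_CombineSquads : Prop := ∀ (squads1 : List (String × List (String × String × String))) (squads2 : List (String × List (String × String × String))), Dom_CombineSquads squads1 squads2 → Pre_CombineSquads squads1 squads2 → Spec_CombineSquads squads1 squads2 (CombineSquads squads1 squads2)

-- ===== LEMMAS AND PROOFS =====

-- insertBy skips a prefix none of whose elements x goes before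
theorem insertBy_append_left {α : Type} (before : α → α → Bool) (x : α) (ys zs : List α)
    (h : ∀ y ∈ ys, before x y = false) :
    PySem.List.insertBy before x (ys ++ zs) = ys ++ PySem.List.insertBy before x zs := by
  induction ys with
  | nil => rfl
  | cons y ys ih =>
    have hy := h y (by simp)
    simp [PySem.List.insertBy, hy, ih (fun y hy => h y (by simp [hy]))]

-- insertBy puts x in front when x goes before everything
theorem insertBy_front {α : Type} (before : α → α → Bool) (x : α) (zs : List α)
    (h : ∀ z ∈ zs, before x z = true) :
    PySem.List.insertBy before x zs = x :: zs := by
  cases zs with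
  | nil => rfl
  | cons z zs => simp [PySem.List.insertBy, h z (by simp)]

-- a stable sort by a key with values in {0,1,2,3} is the concatenation of the four filters
theorem sorted_four {α : Type} (kf : α → Int) (xs : List α)
    (h : ∀ e ∈ xs, kf e = 0 ∨ kf e = 1 ∨ kf e = 2 ∨ kf e = 3) :
    PySem.List.sorted xs kf false =
      xs.filter (fun e => kf e == 0) ++ xs.filter (fun e => kf e == 1) ++
      xs.filter (fun e => kf e == 2) ++ xs.filter (fun e => kf e == 3) := by
  induction xs using List.reverseRecOn with
  | nil => rfl
  | append_singleton xs x ih =>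
    have hxs : ∀ e ∈ xs, kf e = 0 ∨ kf e = 1 ∨ kf e = 2 ∨ kf e = 3 :=
      fun e he => h e (by simp [he])
    have hx := h x (by simp)
    have key_filter : ∀ (i : Int), ∀ y ∈ xs.filter (fun e => kf e == i), kf y = i := by
      intro i y hy
      simpa using (List.mem_filter.mp hy).2
    -- x goes after every element of a bucket with key ≤ kf x …
    have bf : ∀ (j : Int), j ≤ kf x → ∀ z ∈ xs.filter (fun e => kf e == j),
        decide (kf x < kf z) = false := by
      intro j hj z hz
      have hz' := key_filter j z hz
      simp only [hz', decide_eq_false_iff_not, not_lt]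
      exact hj
    -- … and before every element of a bucket with key > kf x
    have bt : ∀ (j : Int), kf x < j → ∀ z ∈ xs.filter (fun e => kf e == j),
        decide (kf x < kf z) = true := by
      intro j hj z hz
      have hz' := key_filter j z hz
      simp only [hz', decide_eq_true_eq]
      exact hj
    rw [PySem.List.sorted_eq_foldl_insertBy, List.foldl_append]
    rw [← PySem.List.sorted_eq_foldl_insertBy, ih hxs]
    simp only [List.foldl_cons, List.foldl_nil, List.filter_append, List.append_assoc]
    rcases hx with hx | hx | hx | hx
    · -- kf x = 0 : insert after bucket 0
      rw [insertBy_append_left _ _ _ _ (bf 0 (by omega)),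
          insertBy_front _ _ _ (by
            intro z hz
            rcases List.mem_append.mp hz with hz | hz
            · exact bt 1 (by omega) z hz
            rcases List.mem_append.mp hz with hz | hz
            · exact bt 2 (by omega) z hz
            · exact bt 3 (by omega) z hz)]
      simp [hx]
    · -- kf x = 1 : insert after bucket 1
      rw [insertBy_append_left _ _ _ _ (bf 0 (by omega)),
          insertBy_append_left _ _ _ _ (bf 1 (by omega)),
          insertBy_front _ _ _ (by
            intro z hz
            rcases List.mem_append.mp hz with hz | hz
            · exact bt 2 (by omega) z hz
            · exact bt 3 (by omega) z hz)]
      simp [hx]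
    · -- kf x = 2 : insert after bucket 2
      rw [insertBy_append_left _ _ _ _ (bf 0 (by omega)),
          insertBy_append_left _ _ _ _ (bf 1 (by omega)),
          insertBy_append_left _ _ _ _ (bf 2 (by omega)),
          insertBy_front _ _ _ (fun z hz => bt 3 (by omega) z hz)]
      simp [hx]
    · -- kf x = 3 : insert at the very end
      rw [insertBy_append_left _ _ _ _ (bf 0 (by omega)),
          insertBy_append_left _ _ _ _ (bf 1 (by omega)),
          insertBy_append_left _ _ _ _ (bf 2 (by omega)),
          PySem.List.insertBy_of_forall_not_before _ _ _ (bf 3 (by omega))]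
      simp [hx]

-- B's bucket loop: the bucket at c collects, in order, the entries whose position is c
theorem buckets_getD (l : List (String × String × String))
    (d : PySem.Dict String (List (String × String × String))) (c : String) :
    (l.foldl (fun b e => b.modify e.2.2 [] (fun v => v ++ [e])) d).getD c [] =
      d.getD c [] ++ l.filter (fun e => e.2.2 == c) := by
  have h1 : l.foldl (fun b e => b.modify e.2.2 [] (fun v => v ++ [e])) d =
      (l.map (fun e => (e.2.2, e))).foldl (fun b p => b.modify p.1 [] (fun v => v ++ [p.2])) d := by
    rw [List.foldl_map]
  rw [h1, PySem.Dict.getD_foldl_modify_append]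
  congr 1
  rw [List.filter_map]
  simp [List.map_map, Function.comp_def]

theorem CombineSquads_eq (squads1 squads2 : List (String × List (String × String × String)))
    (hPre : Pre_CombineSquads squads1 squads2) :
    CombineSquads squads1 squads2 = CombineSquads_alt squads1 squads2 := by
  unfold CombineSquads CombineSquads_alt
  simp only [PySem.Dict.keys, List.foldl_map]
  congr 1
  apply PySem.List.foldl_congr_mem
  intro out p hp
  have hnd := PySem.Dict.nodup_keys_ofList squads1
  have hget : (PySem.Dict.ofList squads1).getD p.1 [] = p.2 :=
    PySem.Dict.getD_of_mem_items _ (by rcases p with ⟨k, v⟩; exact hp) hnd []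
  rw [hget]
  have hmem := (hPre p hp).2
  set l := p.2 ++ (PySem.Dict.ofList squads2).getD p.1 [] with hl
  congr 1
  -- sorted by posValue = four-bucket concatenation
  have hk : ∀ e ∈ l, posValue e.2.2 = 0 ∨ posValue e.2.2 = 1 ∨
      posValue e.2.2 = 2 ∨ posValue e.2.2 = 3 := by
    intro e he
    have h' := hmem e he
    simp only [List.mem_cons, List.not_mem_nil, or_false] at h'
    rcases h' with h | h | h | h <;> rw [h] <;> decide
  rw [sorted_four _ _ hk]
  have filter_eq : ∀ (c : String) (i : Int), c ∈ (["G", "D", "M", "F"] : List String) →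
      posValue c = i →
      (∀ s ∈ (["G", "D", "M", "F"] : List String), (posValue s == i) = (s == c)) →
      l.filter (fun e => posValue e.2.2 == i) = l.filter (fun e => e.2.2 == c) := by
    intro c i _ _ hchar
    apply List.filter_congr
    intro e he
    exact hchar e.2.2 (hmem e he)
  rw [filter_eq "G" 0 (by decide) (by decide) (by decide),
      filter_eq "D" 1 (by decide) (by decide) (by decide),
      filter_eq "M" 2 (by decide) (by decide) (by decide),
      filter_eq "F" 3 (by decide) (by decide) (by decide)]
  rw [buckets_getD, buckets_getD, buckets_getD, buckets_getD]
  have gG : (PySem.Dict.ofList [("G", ([] : List (String × String × String))), ("D", []), ("M", []), ("F", [])]).getD "G" [] = [] := rfl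
  have gD : (PySem.Dict.ofList [("G", ([] : List (String × String × String))), ("D", []), ("M", []), ("F", [])]).getD "D" [] = [] := rfl
  have gM : (PySem.Dict.ofList [("G", ([] : List (String × String × String))), ("D", []), ("M", []), ("F", [])]).getD "M" [] = [] := rfl
  have gF : (PySem.Dict.ofList [("G", ([] : List (String × String × String))), ("D", []), ("M", []), ("F", [])]).getD "F" [] = [] := rfl
  rw [gG, gD, gM, gF]
  simp

-- ===== VERDICT (by name: the statement is the Claim_ definition above) =====
theorem CombineSquads_spec : Claim_equal_CombineSquads := by
  intro squads1 squads2 _ hPre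
  unfold Spec_CombineSquads
  exact CombineSquads_eq squads1 squads2 hPre
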